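-- pv_equiv track=rewrite | github.com/iiixi311/pythoncipher | 3DES/DES/conversion.py | toArray2D
-- ===== SOURCE A (Python) =====
-- def toArray2D(text):
-- 	l = int(len(text)/4)
-- 	result = []
-- 	temp =[]
-- 	k = 0
-- 	for i in range(4):
-- 		for j in range(l):
-- 			temp.append(text[k])
-- 			k +=1
-- 		result.append(temp)
-- 		temp = []
-- 	return result
-- ===== SOURCE B (Python) =====
-- def toArray2D(text):
--     l = len(text) // 4
--     return [list(text[i * l:(i + 1) * l]) for i in range(4)]
-- ===== Notes on version B (the rewrite author's own statement) =====
-- stated objective: simpler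
-- what changed: Replaces the nested loops with a running element index k by a direct partition into four slices at computed chunk boundaries.
import Mathlib
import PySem

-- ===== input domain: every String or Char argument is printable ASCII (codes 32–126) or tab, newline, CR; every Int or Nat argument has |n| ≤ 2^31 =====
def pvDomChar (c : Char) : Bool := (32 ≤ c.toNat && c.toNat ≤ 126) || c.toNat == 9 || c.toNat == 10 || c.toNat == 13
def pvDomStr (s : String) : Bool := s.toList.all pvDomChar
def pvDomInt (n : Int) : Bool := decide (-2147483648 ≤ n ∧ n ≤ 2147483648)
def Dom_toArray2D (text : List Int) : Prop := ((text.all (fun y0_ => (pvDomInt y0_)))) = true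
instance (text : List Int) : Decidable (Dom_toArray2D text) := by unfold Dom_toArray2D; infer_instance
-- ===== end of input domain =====

-- B partitions the input directly into four slices at computed chunk boundaries
-- instead of A's nested loops with a running index; objective: simpler.


-- ===== PORT A =====
-- literal port of A: l = len(text)//4; outer loop over range(4), inner over range(l),
-- appending text[k] (always in range, so pyGetD's default is never used) and incrementing k.
def toArray2D (text : List Int) : List (List Int) :=
  let l : Nat := text.length / 4
  let st := (PySem.List.pyRange 0 4 1).foldl
    (fun (st : List (List Int) × List Int × Int) _i =>
      let inner := (PySem.List.pyRange 0 (l : Int) 1).foldl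
        (fun (tk : List Int × Int) _j =>
          (tk.1 ++ [PySem.List.pyGetD text tk.2 0], tk.2 + 1))
        (st.2.1, st.2.2)
      (st.1 ++ [inner.1], [], inner.2))
    ([], [], 0)
  st.1

-- ===== PORT B =====
def toArray2D_alt (text : List Int) : List (List Int) :=
  let l : Nat := text.length / 4
  (PySem.List.pyRange 0 4 1).map
    (fun i => PySem.List.slice text (some (i * (l : Int))) (some ((i + 1) * (l : Int))))

-- ===== PRECONDITION & SPEC =====
def Spec_toArray2D (text : List Int) (out : List (List Int)) : Prop := out = toArray2D_alt text
instance (text : List Int) (out : List (List Int)) : Decidable (Spec_toArray2D text out) := by unfold Spec_toArray2D; infer_instance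

-- ===== CLAIM (what is proved, stated in full; the proofs are below) =====
def Claim_equal_toArray2D : Prop := ∀ (text : List Int), Dom_toArray2D text → Spec_toArray2D text (toArray2D text)

-- ===== LEMMAS AND PROOFS =====

-- A's inner loop, started at (temp, k), appends the l elements text[k..k+l-1].
theorem inner_loop_eq (text : List Int) (l : Nat) (temp : List Int) (k : Int) :
    (PySem.List.pyRange 0 (l : Int) 1).foldl
      (fun (tk : List Int × Int) _j =>
        (tk.1 ++ [PySem.List.pyGetD text tk.2 0], tk.2 + 1)) (temp, k)
    = (temp ++ (List.range l).map (fun (j : Nat) => PySem.List.pyGetD text (k + (j : Int)) 0),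
       k + l) := by
  induction l generalizing temp k with
  | zero => simp [PySem.List.pyRange_one_eq_nil]
  | succ n ih =>
      rw [show ((n + 1 : Nat) : Int) = (n : Int) + 1 by push_cast; ring,
        PySem.List.pyRange_one_succ_right (by positivity)]
      rw [List.foldl_append, ih]
      simp [List.range_succ]
      omega

-- the chunk of l elements starting at k (with k+l within the list) as a slice
theorem chunk_eq_slice (text : List Int) (l : Nat) (k : Int) (hk : 0 ≤ k)
    (h : k + l ≤ text.length) :
    (List.range l).map (fun (j : Nat) => PySem.List.pyGetD text (k + (j : Int)) 0)
    = PySem.List.slice text (some k) (some (k + l)) := by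
  rw [PySem.List.slice_toNat text hk (by positivity)]
  apply List.ext_getElem
  · simp; omega
  · intro i h1 h2
    simp only [List.getElem_map, List.getElem_range, List.getElem_take, List.getElem_drop]
    simp at h1
    rw [show (k + (i : Nat)) = ((k.toNat + i : Nat) : Int) by push_cast; omega,
      PySem.List.pyGetD_natCast]
    rw [List.getD_eq_getElem _ _ (by omega)]

theorem toArray2D_spec : Claim_equal_toArray2D := by
  intro text _
  unfold Spec_toArray2D toArray2D toArray2D_alt
  have h4 : PySem.List.pyRange 0 4 1 = ([0, 1, 2, 3] : List Int) := by decide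
  rw [h4]
  set l : Nat := text.length / 4 with hl
  have hlen : 4 * l ≤ text.length := by omega
  simp only [List.foldl_cons, List.foldl_nil, List.map_cons, List.map_nil]
  rw [inner_loop_eq, inner_loop_eq, inner_loop_eq, inner_loop_eq]
  simp only [List.nil_append, Int.zero_add, List.cons_append, List.cons.injEq]
  refine ⟨?_, ?_, ?_, ?_, trivial⟩
  · rw [show ((0 : Int) * (l : Int)) = (0 : Int) from by ring,
      show ((1 : Int) * (l : Int)) = (0 : Int) + (l : Int) from by ring]
    have h := chunk_eq_slice text l 0 le_rfl (by omega)
    simpa using h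
  · rw [show ((1 : Int) * (l : Int)) = (l : Int) from by ring,
      show (((1 : Int) + 1) * (l : Int)) = (l : Int) + (l : Int) from by ring]
    exact chunk_eq_slice text l (l : Int) (by positivity) (by omega)
  · rw [show ((2 : Int) * (l : Int)) = (l : Int) + (l : Int) from by ring,
      show (((2 : Int) + 1) * (l : Int)) = (l : Int) + (l : Int) + (l : Int) from by ring]
    exact chunk_eq_slice text l ((l : Int) + (l : Int)) (by positivity) (by omega)
  · rw [show ((3 : Int) * (l : Int)) = (l : Int) + (l : Int) + (l : Int) from by ring,
      show (((3 : Int) + 1) * (l : Int)) = (l : Int) + (l : Int) + (l : Int) + (l : Int) from by ring]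
    exact chunk_eq_slice text l ((l : Int) + (l : Int) + (l : Int)) (by positivity) (by omega)
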